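-- pv_equiv track=rewrite | github.com/Nikkuniku/AtcoderProgramming | ARC/ARC182/b.py | solve
-- ===== SOURCE A (Python) =====
-- def solve(n, k):
--     s = 1 << (k - 1)
--     res = [s]
--     q = [s]
--     i = k - 2
--     while len(res) < n:
--         if i < 0:
--             break
--         m = len(q)
--         for j in range(m):
--             q.append(q[j] + (1 << i))
--             res.append(q[j] + (1 << i))
--         i -= 1
--     while len(res) < n:
--         res.append(q[-1])
--     while len(res) > n:
--         res.pop()
--     return res
-- ===== SOURCE B (Python) =====
-- def _rev_bits(t, w):
--     # reversal of the w-bit word t (0 <= t < 2**w): reverse t's significant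
--     # bits, then shift into the high end of the word
--     r = 0
--     b = 0
--     while t:
--         r = (r << 1) | (t & 1)
--         t >>= 1
--         b += 1
--     return r << (w - b)
--
--
-- def solve(n, k):
--     full = 1 << (k - 1)
--     m = min(n, full)
--     res = [full + _rev_bits(t, k - 1) for t in range(m)]
--     res += [(1 << k) - 1] * (n - len(res))
--     return res
-- ===== Notes on version B (the rewrite author's own statement) =====
-- stated objective: alternative
-- what changed: Replaces A's BFS list-doubling queue with a direct closed form: the t-th element is 2^(k-1) plus the (k-1)-bit reversal of t, then the list is padded with 2^k-1; no queue, no doubling loop, no trimming.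
import Mathlib
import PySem

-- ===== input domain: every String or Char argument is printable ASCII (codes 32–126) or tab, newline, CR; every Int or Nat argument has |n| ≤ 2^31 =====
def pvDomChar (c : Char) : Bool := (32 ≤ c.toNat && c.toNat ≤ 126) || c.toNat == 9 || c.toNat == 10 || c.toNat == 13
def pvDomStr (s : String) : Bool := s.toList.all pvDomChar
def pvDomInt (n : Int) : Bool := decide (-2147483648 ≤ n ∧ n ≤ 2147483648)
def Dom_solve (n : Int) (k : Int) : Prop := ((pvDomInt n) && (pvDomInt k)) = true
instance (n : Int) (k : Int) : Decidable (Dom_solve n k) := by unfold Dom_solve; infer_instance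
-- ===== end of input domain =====

-- B replaces A's BFS list-doubling queue with a closed form (element t = 2^(k-1) + bit-reversal of t,
-- padded with 2^k - 1); return-value equivalence proved on n ≥ 0, k ≥ 1.

-- ===== PORT A =====
-- A's while/for doubling loop: each round reads the first m = len(q) elements of q and appends
-- q[j] + (1 << i) to both q and res, so one round is `++ q.map (· + 2^i)`. Fuel (k-1).toNat covers
-- every round Python can perform (i counts down from k-2; the loop breaks at i < 0).
def solveLoopA (fuel : Nat) (res q : List Int) (i n : Int) : List Int × List Int :=
  match fuel with
  | 0 => (res, q)
  | Nat.succ f =>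
    if (res.length : Int) < n then
      if i < 0 then (res, q)
      else
        let adds := q.map (fun x => x + (2 : Int) ^ i.toNat)
        solveLoopA f (res ++ adds) (q ++ adds) (i - 1) n
    else (res, q)

def solve (n : Int) (k : Int) : List Int :=
  let s : Int := (2 : Int) ^ (k - 1).toNat
  let p := solveLoopA (k - 1).toNat [s] [s] (k - 2) n
  let res2 := p.1 ++ List.replicate (n - p.1.length).toNat p.2.getLast!
  res2.take n.toNat

-- ===== PORT B =====
-- helpers the port of B needs for its termination argument (t halves each iteration)
theorem div2 (t : Int) : PySem.Int.floordiv t 2 = t / 2 := PySem.Int.floordiv_eq_ediv_of_pos (by norm_num)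

theorem fd_lt (t : Int) (h : 0 < t) : (PySem.Int.floordiv t 2).toNat < t.toNat := by
  rw [div2]; omega

-- B's `while t:` loop in _rev_bits: r = 2*r + (t % 2); t = t // 2; b += 1. The guard `0 < t` is
-- exact on every terminating run (t stays ≥ 0 there; on t < 0 Python's loop never ends).
def revCore (t r : Int) (b : Nat) : Int × Nat :=
  if h : 0 < t then
    revCore (PySem.Int.floordiv t 2) (2 * r + PySem.Int.mod t 2) (b + 1)
  else (r, b)
termination_by t.toNat
decreasing_by exact fd_lt t h

-- `r << (w - b)`: in every call of Source B t < 2^w, so w - b ≥ 0 and Nat subtraction is exact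
def revBits (t : Int) (w : Nat) : Int :=
  let p := revCore t 0 0
  p.1 * 2 ^ (w - p.2)

def solve_alt (n : Int) (k : Int) : List Int :=
  let full : Int := (2 : Int) ^ (k - 1).toNat
  let m := min n full
  let res := (PySem.List.pyRange 0 m 1).map (fun t => full + revBits t (k - 1).toNat)
  res ++ List.replicate (n - res.length).toNat ((2 : Int) ^ k.toNat - 1)

-- ===== PRECONDITION & SPEC =====
-- Pre excludes exactly the inputs on which A raises: k ≤ 0 (ValueError from 1 << (k-1)) and
-- n < 0 (IndexError: pop from the empty list while trimming).
def Pre_solve (n : Int) (k : Int) : Prop := 0 ≤ n ∧ 1 ≤ k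
instance (n : Int) (k : Int) : Decidable (Pre_solve n k) := by unfold Pre_solve; infer_instance
def pvWitness_solve : Int × Int := (5, 3)

def Spec_solve (n : Int) (k : Int) (out : List Int) : Prop := out = solve_alt n k
instance (n : Int) (k : Int) (out : List Int) : Decidable (Spec_solve n k out) := by unfold Spec_solve; infer_instance

-- ===== CLAIM (what is proved, stated in full; the proofs are below) =====
def Claim_equal_solve : Prop := ∀ (n : Int) (k : Int), Dom_solve n k → Pre_solve n k → Spec_solve n k (solve n k)

-- ===== LEMMAS AND PROOFS =====
def revAux (r t : Int) : Nat → Int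
  | 0 => r
  | Nat.succ w => revAux (2 * r + PySem.Int.mod t 2) (PySem.Int.floordiv t 2) w

theorem mod2 (t : Int) : PySem.Int.mod t 2 = t % 2 := PySem.Int.mod_eq_emod_of_pos (by norm_num)

theorem revAux_split (w : Nat) : ∀ (r t : Int), revAux r t w = r * 2 ^ w + revAux 0 t w := by
  induction w with
  | zero => intro r t; simp [revAux]
  | succ w ih =>
    intro r t
    rw [revAux, revAux, ih, ih (2 * 0 + PySem.Int.mod t 2)]
    ring

theorem rev_zero (w : Nat) : revAux 0 0 w = 0 := by
  induction w with
  | zero => rfl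
  | succ w ih =>
    rw [revAux, mod2, div2]
    have h1 : (2 * 0 + (0:Int) % 2) = 0 := by norm_num
    have h2 : ((0:Int) / 2) = 0 := by norm_num
    rw [h1, h2, ih]

theorem rev_step (t : Int) (w : Nat) :
    revAux 0 t (w + 1) = (t % 2) * 2 ^ w + revAux 0 (t / 2) w := by
  rw [revAux, mod2, div2, revAux_split]; ring

theorem revCore_zero (r : Int) (b : Nat) : revCore 0 r b = (r, b) := by
  rw [revCore]; simp

theorem revCore_pos (t r : Int) (b : Nat) (h : 0 < t) :
    revCore t r b = revCore (t / 2) (2 * r + t % 2) (b + 1) := by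
  rw [revCore, dif_pos h, mod2, div2]

theorem revCore_acc : ∀ (n : Nat) (t : Int), t.toNat = n → 0 ≤ t → ∀ (r : Int) (b : Nat),
    revCore t r b = (r * 2 ^ (revCore t 0 0).2 + (revCore t 0 0).1, b + (revCore t 0 0).2) := by
  intro n
  induction n using Nat.strong_induction_on with
  | _ n ih =>
    intro t hn h0 r b
    rcases lt_or_eq_of_le h0 with hpos | hz
    · rw [revCore_pos t r b hpos, revCore_pos t 0 0 hpos]
      have hd : (t / 2).toNat < n := by omega
      rw [ih _ hd (t / 2) rfl (by omega) (2 * r + t % 2) (b + 1),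
          ih _ hd (t / 2) rfl (by omega) (2 * 0 + t % 2) (0 + 1)]
      refine Prod.ext_iff.mpr ⟨?_, ?_⟩ <;> dsimp only
      · ring
      · omega
    · rw [← hz, revCore_zero, revCore_zero]
      simp

theorem revCore_val : ∀ (n : Nat) (t : Int), t.toNat = n → 0 ≤ t →
    (revCore t 0 0).1 = revAux 0 t (revCore t 0 0).2 ∧ t < 2 ^ (revCore t 0 0).2 ∧
      (t = 0 ∨ 2 ^ ((revCore t 0 0).2 - 1) ≤ t) := by
  intro n
  induction n using Nat.strong_induction_on with
  | _ n ih =>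
    intro t hn h0
    rcases lt_or_eq_of_le h0 with hpos | hz
    · have hd : (t / 2).toNat < n := by omega
      obtain ⟨ih1, ih2, ih3⟩ := ih _ hd (t / 2) rfl (by omega)
      have hstep : revCore t 0 0 =
          ((t % 2) * 2 ^ (revCore (t / 2) 0 0).2 + (revCore (t / 2) 0 0).1,
            1 + (revCore (t / 2) 0 0).2) := by
        rw [revCore_pos t 0 0 hpos,
            revCore_acc (t / 2).toNat (t / 2) rfl (by omega) (2 * 0 + t % 2) (0 + 1)]
        refine Prod.ext_iff.mpr ⟨?_, ?_⟩
        · dsimp only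
          ring
        · omega
      rw [hstep]
      dsimp only
      set L := (revCore (t / 2) 0 0).2 with hL
      have h2L : (2 : Int) ^ (1 + L) = 2 * 2 ^ L := by rw [pow_add]; ring
      refine ⟨?_, by omega, Or.inr ?_⟩
      · rw [show 1 + L = L + 1 from by omega, revAux, mod2, div2, revAux_split, ih1]
        ring
      · rcases ih3 with h | h
        · have hLz : L = 0 := by rw [hL, h, revCore_zero]
          have h1 : (2 : Int) ^ (1 + L - 1) = 1 := by rw [hLz]; norm_num
          omega
        · by_cases hL0 : L = 0
          · have h1 : (2 : Int) ^ (1 + L - 1) = 1 := by rw [hL0]; norm_num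
            omega
          · have h2 : (2 : Int) ^ (1 + L - 1) = 2 ^ (L - 1) * 2 := by
              rw [show 1 + L - 1 = (L - 1) + 1 from by omega, pow_succ]
            omega
    · rw [← hz, revCore_zero]
      simp [revAux]




theorem rev_add_pow (r : Nat) : ∀ (w : Nat) (t : Int), r < w → 0 ≤ t → t < 2 ^ r →
    revAux 0 (t + 2 ^ r) w = revAux 0 t w + 2 ^ (w - 1 - r) := by
  induction r with
  | zero =>
    intro w t hrw ht0 ht
    obtain ⟨w', rfl⟩ := Nat.exists_eq_succ_of_ne_zero (by omega : w ≠ 0)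
    have : t = 0 := by omega
    subst this
    norm_num
    rw [rev_step, rev_zero]
    norm_num [rev_zero]
  | succ r ih =>
    intro w t hrw ht0 ht
    obtain ⟨w', rfl⟩ := Nat.exists_eq_succ_of_ne_zero (by omega : w ≠ 0)
    have hc : (2 : Int) ^ (r + 1) = 2 * 2 ^ r := by ring
    have h1 : (t + 2 ^ (r + 1)) % 2 = t % 2 := by
      have := hc; omega
    have h2 : (t + 2 ^ (r + 1)) / 2 = t / 2 + 2 ^ r := by
      have := hc; omega
    have ht2 : t / 2 < 2 ^ r := by have := hc; omega
    rw [rev_step, h1, h2, ih w' (t / 2) (by omega) (by omega) ht2, rev_step]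
    have : w' + 1 - 1 - (r + 1) = w' - 1 - r := by omega
    rw [this]; ring

theorem rev_all_ones (w : Nat) : revAux 0 ((2 : Int) ^ w - 1) w = 2 ^ w - 1 := by
  induction w with
  | zero => simp [revAux]
  | succ w ih =>
    have hc : (2 : Int) ^ (w + 1) = 2 * 2 ^ w := by ring
    have hp : (1 : Int) ≤ 2 ^ w := by exact_mod_cast Nat.one_le_two_pow (n := w)
    have h1 : ((2 : Int) ^ (w + 1) - 1) % 2 = 1 := by omega
    have h2 : ((2 : Int) ^ (w + 1) - 1) / 2 = 2 ^ w - 1 := by omega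
    rw [rev_step, h1, h2, ih]; ring

theorem rev_pad (w : Nat) : ∀ (t : Int), 0 ≤ t → t < 2 ^ w →
    revAux 0 t (w + 1) = 2 * revAux 0 t w := by
  induction w with
  | zero =>
    intro t h0 h
    have : t = 0 := by omega
    subst this
    rw [rev_zero, rev_zero]
    ring
  | succ w ih =>
    intro t h0 h
    have h2 : (2 : Int) ^ (w + 1) = 2 * 2 ^ w := by rw [pow_succ]; ring
    rw [rev_step t (w + 1), ih (t / 2) (by omega) (by omega), rev_step t w]
    ring

theorem rev_pad_iter (d : Nat) : ∀ (L : Nat) (t : Int), 0 ≤ t → t < 2 ^ L →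
    revAux 0 t (L + d) = revAux 0 t L * 2 ^ d := by
  induction d with
  | zero => intro L t _ _; simp
  | succ d ih =>
    intro L t h0 h
    have hlt : t < 2 ^ (L + d) := by
      have : (2 : Int) ^ L ≤ 2 ^ (L + d) := by
        apply pow_le_pow_right₀ (by norm_num)
        omega
      omega
    rw [show L + (d + 1) = (L + d) + 1 from rfl, rev_pad (L + d) t h0 hlt, ih L t h0 h,
        pow_succ]
    ring

theorem rev_pad_le (L w : Nat) (t : Int) (hLw : L ≤ w) (h0 : 0 ≤ t) (h : t < 2 ^ L) :
    revAux 0 t w = revAux 0 t L * 2 ^ (w - L) := by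
  have h1 := rev_pad_iter (w - L) L t h0 h
  rwa [show L + (w - L) = w from by omega] at h1

theorem revBits_eq_aux (w : Nat) (t : Int) (h0 : 0 ≤ t) (hw : t < 2 ^ w) :
    revBits t w = revAux 0 t w := by
  obtain ⟨hv, hlt, hmin⟩ := revCore_val t.toNat t rfl h0
  set L := (revCore t 0 0).2 with hL
  have hLw : L ≤ w := by
    rcases hmin with h | h
    · subst h
      rw [revCore_zero] at hL
      omega
    · by_contra hgt
      have hwL : w ≤ L - 1 := by omega
      have : (2 : Int) ^ w ≤ 2 ^ (L - 1) := by
        apply pow_le_pow_right₀ (by norm_num) hwL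
      omega
  simp only [revBits]
  rw [hv, ← hL, rev_pad_le L w t hLw h0 hlt]

theorem revBits_zero (w : Nat) : revBits 0 w = 0 := by
  simp [revBits, revCore_zero]

def Pl (W j : Nat) : List Int := (List.range j).map (fun t : Nat => (2 : Int) ^ W + revBits (t : Int) W)

def gLoop (fuel : Nat) (q : List Int) (i n : Int) : List Int :=
  match fuel with
  | 0 => q
  | Nat.succ f =>
    if (q.length : Int) < n then
      if i < 0 then q
      else gLoop f (q ++ q.map (fun x => x + (2 : Int) ^ i.toNat)) (i - 1) n
    else q

theorem loop_pair (f : Nat) : ∀ (q : List Int) (i n : Int),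
    solveLoopA f q q i n = (gLoop f q i n, gLoop f q i n) := by
  induction f with
  | zero => intro q i n; rfl
  | succ f ih =>
    intro q i n
    rw [solveLoopA, gLoop]
    split_ifs with h1 h2
    · rfl
    · exact ih _ _ _
    · rfl

theorem Pl_double (W r : Nat) (hrW : r < W) :
    Pl W (2 ^ r) ++ (Pl W (2 ^ r)).map (fun x => x + (2 : Int) ^ (W - 1 - r)) = Pl W (2 ^ (r + 1)) := by
  have hsplit : (2 : Nat) ^ (r + 1) = 2 ^ r + 2 ^ r := by ring
  rw [Pl, Pl, hsplit, List.range_add, List.map_append, List.map_map, List.map_map]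
  congr 1
  apply List.map_congr_left
  intro t ht
  have ht' : t < 2 ^ r := List.mem_range.mp ht
  simp only [Function.comp]
  have hb1 : ((t : Nat) : Int) < 2 ^ W := by
    exact_mod_cast lt_of_lt_of_le ht' (Nat.pow_le_pow_right (by norm_num) (by omega))
  have hb2 : ((2 ^ r + t : Nat) : Int) < 2 ^ W := by
    have : 2 ^ r + t < 2 ^ W := by
      have h1 : 2 ^ r + t < 2 ^ (r + 1) := by
        have : (2 : Nat) ^ (r + 1) = 2 ^ r + 2 ^ r := by ring
        omega
      exact lt_of_lt_of_le h1 (Nat.pow_le_pow_right (by norm_num) (by omega))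
    exact_mod_cast this
  rw [revBits_eq_aux W (t : Int) (by positivity) hb1,
      revBits_eq_aux W ((2 ^ r + t : Nat) : Int) (by positivity) hb2]
  have hcast : ((2 ^ r + t : Nat) : Int) = (t : Int) + 2 ^ r := by push_cast; ring
  rw [hcast, rev_add_pow r W (t : Int) hrW (by positivity) (by exact_mod_cast ht')]
  ring

theorem gLoop_spec (W : Nat) (n : Int) : ∀ (f r : Nat), r + f = W →
    ∃ ρ : Nat, r ≤ ρ ∧ ρ ≤ W ∧ (n ≤ ((2 ^ ρ : Nat) : Int) ∨ ρ = W) ∧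
      gLoop f (Pl W (2 ^ r)) ((f : Int) - 1) n = Pl W (2 ^ ρ) := by
  intro f
  induction f with
  | zero =>
    intro r h
    have hrW : r = W := by omega
    subst hrW
    exact ⟨r, le_refl r, le_refl r, Or.inr rfl, by rw [gLoop]⟩
  | succ f ih =>
    intro r h
    rw [gLoop]
    by_cases hlt : ((Pl W (2 ^ r)).length : Int) < n
    · rw [if_pos hlt, if_neg (by push_cast; omega)]
      have hi : ((f + 1 : Nat) : Int) - 1 - 1 = (f : Int) - 1 := by push_cast; ring
      have hit : (((f + 1 : Nat) : Int) - 1).toNat = W - 1 - r := by omega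
      rw [hi, hit, Pl_double W r (by omega)]
      obtain ⟨ρ, h1, h2, h3, h4⟩ := ih (r + 1) (by omega)
      exact ⟨ρ, by omega, h2, h3, h4⟩
    · rw [if_neg hlt]
      refine ⟨r, le_refl r, by omega, Or.inl ?_, rfl⟩
      simp only [Pl, List.length_map, List.length_range] at hlt
      omega

theorem getLast!_concat_int (l : List Int) (a : Int) : (l ++ [a]).getLast! = a := by
  cases l with
  | nil => rfl
  | cons x xs =>
    rw [show ((x :: xs) ++ [a]).getLast! = ((x :: xs) ++ [a]).getLast (by simp) from rfl]
    exact List.getLast_concat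

theorem Pl_last (W : Nat) : (Pl W (2 ^ W)).getLast! = (2 : Int) ^ (W + 1) - 1 := by
  have h1 : (2 : Nat) ^ W = (2 ^ W - 1) + 1 := by
    have := Nat.one_le_two_pow (n := W); omega
  rw [Pl, h1, List.range_succ, List.map_append, List.map_singleton, getLast!_concat_int]
  have hc : ((2 ^ W - 1 : Nat) : Int) = (2 : Int) ^ W - 1 := by
    have := Nat.one_le_two_pow (n := W); push_cast [this]; ring
  have hb : ((2 ^ W - 1 : Nat) : Int) < 2 ^ W := by
    rw [hc]; omega
  rw [revBits_eq_aux W _ (by positivity) hb, hc, rev_all_ones]; ring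

theorem Pl_length (W j : Nat) : (Pl W j).length = j := by simp [Pl]

theorem Pl_take (W m j : Nat) : (Pl W j).take m = Pl W (min m j) := by
  rw [Pl, Pl, ← List.map_take, List.take_range]

theorem pyRange_map_Pl (W : Nat) (m : Nat) :
    (PySem.List.pyRange 0 (m : Int) 1).map (fun t => (2 : Int) ^ W + revBits t W) = Pl W m := by
  rw [PySem.List.pyRange_one]
  simp [Pl, List.map_map, Function.comp]

theorem main_eq (n k : Int) (hn : 0 ≤ n) (hk : 1 ≤ k) : solve n k = solve_alt n k := by
  have hWk : (((k - 1).toNat : Nat) : Int) = k - 1 := Int.toNat_of_nonneg (by omega)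
  set W := (k - 1).toNat with hW
  have hPl1 : [(2 : Int) ^ W] = Pl W 1 := by
    simp [Pl, revBits_zero]
  have hk2 : k - 2 = (W : Int) - 1 := by omega
  obtain ⟨ρ, hρr, hρW, hcase, hloop⟩ := gLoop_spec W n W 0 (by omega)
  have hpow : Pl W (2 ^ 0) = Pl W 1 := by norm_num
  rw [hpow] at hloop
  have hkt : k.toNat = W + 1 := by omega
  have hcρ : ((2 ^ ρ : Nat) : Int) = (2 : Int) ^ ρ := by push_cast; ring
  have hcW : ((2 ^ W : Nat) : Int) = (2 : Int) ^ W := by push_cast; ring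
  have hle : ((2 ^ ρ : Nat) : Int) ≤ ((2 ^ W : Nat) : Int) := by
    exact_mod_cast Nat.pow_le_pow_right (by norm_num) hρW
  have hpos : (0 : Int) < ((2 ^ ρ : Nat) : Int) := by
    rw [hcρ]; positivity
  simp only [solve, solve_alt, hk2, hkt]
  simp only [← hW]
  rw [hPl1, loop_pair, hloop]
  dsimp only
  rw [Pl_length]
  by_cases hc : n ≤ ((2 ^ ρ : Nat) : Int)
  · -- loop already produced ≥ n elements: no padding, trim to the first n
    have hm : min n ((2 : Int) ^ W) = ((n.toNat : Nat) : Int) := by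
      rw [min_eq_left (by omega : n ≤ (2 : Int) ^ W)]
      omega
    rw [hm, pyRange_map_Pl, Pl_length]
    have hpadA : (n - ((2 ^ ρ : Nat) : Int)).toNat = 0 := by omega
    have hpadB : (n - ((n.toNat : Nat) : Int)).toNat = 0 := by omega
    rw [hpadA, hpadB]
    simp only [List.replicate_zero, List.append_nil]
    rw [Pl_take]
    congr 1
    omega
  · -- loop exhausted all k-1 levels (ρ = W): pad both sides with 2^(W+1) - 1
    have hρ : ρ = W := by tauto
    subst hρ
    have hm : min n ((2 : Int) ^ W) = ((2 ^ W : Nat) : Int) := by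
      rw [hcW, min_eq_right (by omega : (2 : Int) ^ W ≤ n)]
    rw [Pl_last, hm, pyRange_map_Pl, Pl_length]
    rw [List.take_of_length_le]
    simp only [List.length_append, Pl_length, List.length_replicate]
    omega

-- ===== VERDICT (by name: the statement is the Claim_ definition above) =====
theorem solve_spec : Claim_equal_solve := by
  intro n k _ hpre
  exact main_eq n k hpre.1 hpre.2
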